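-- pv_equiv track=rewrite | github.com/kakehashi-inc/laravel-i18n-refactor | src/refactor/utils/string_processor.py | get_position_from_line_column
-- ===== SOURCE A (Python) =====
-- def get_position_from_line_column(content: str, line: int, column: int) -> int:
--     """
--     Get position in content from line and column.
--
--     Args:
--         content: Full content
--         line: Line number (1-based)
--         column: Column number (0-based)
--
--     Returns:
--         Position in content, or -1 if invalid
--     """
--     lines = content.split("\n")
--     if line < 1 or line > len(lines):
--         return -1
--
--     pos = sum(len(lines[i]) + 1 for i in range(line - 1))
--     pos += column
--
--     if pos >= len(content):
--         return -1
--
--     return pos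
-- ===== SOURCE B (Python) =====
-- def get_position_from_line_column(content: str, line: int, column: int) -> int:
--     """Offset from 1-based line / 0-based column; -1 if invalid.
--
--     Scans for newlines incrementally instead of splitting the content
--     into a list of lines and summing their lengths.
--     """
--     if line < 1:
--         return -1
--     start = 0
--     for _ in range(line - 1):
--         idx = content.find("\n", start)
--         if idx == -1:
--             return -1
--         start = idx + 1
--     pos = start + column
--     if pos >= len(content):
--         return -1
--     return pos
-- ===== Notes on version B (the rewrite author's own statement) =====
-- stated objective: alternative
-- what changed: Replaces split('\n') plus a generator-sum over line lengths with a single running offset advanced by incremental find('\n', start) searches, so no line list is built.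
import Mathlib
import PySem

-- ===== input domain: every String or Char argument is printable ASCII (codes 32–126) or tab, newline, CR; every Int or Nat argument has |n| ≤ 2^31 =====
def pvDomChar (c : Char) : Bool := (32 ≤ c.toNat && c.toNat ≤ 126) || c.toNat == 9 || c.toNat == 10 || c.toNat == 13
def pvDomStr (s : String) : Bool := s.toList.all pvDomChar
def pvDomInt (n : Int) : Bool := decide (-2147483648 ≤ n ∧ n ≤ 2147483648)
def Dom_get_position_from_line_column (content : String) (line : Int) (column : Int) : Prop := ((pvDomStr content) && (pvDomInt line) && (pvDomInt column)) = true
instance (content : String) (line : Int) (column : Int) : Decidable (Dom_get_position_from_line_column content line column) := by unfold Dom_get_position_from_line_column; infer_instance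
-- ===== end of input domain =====

-- B replaces split('\n')+sum of line lengths by a single running offset advanced by
-- incremental newline searches; no line list is built (objective: alternative).

-- ===== PORT A =====
-- lines = content.split("\n"); guard; pos = sum(len(lines[i]) + 1 for i in range(line-1)) + column; bounds check
def get_position_from_line_column (content : String) (line : Int) (column : Int) : Int :=
  let lines := PySem.Chars.splitOn content.toList ['\n']
  if line < 1 ∨ (lines.length : Int) < line then -1
  else
    let pos := ((PySem.List.pyRange 0 (line - 1) 1).map
        (fun i => ((PySem.List.pyGetD lines i []).length : Int) + 1)).sum + column
    if PySem.Str.len content ≤ pos then -1 else pos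

-- ===== PORT B =====
-- the find loop of Source B: `for _ in range(line-1): idx = content.find("\n", start); …`
def pvFindLineStart (content : String) (n : Nat) (start : Int) : Option Int :=
  match n with
  | 0 => some start
  | n + 1 =>
    let idx := PySem.Str.findFrom content "\n" start
    if idx = -1 then none else pvFindLineStart content n (idx + 1)

def get_position_from_line_column_alt (content : String) (line : Int) (column : Int) : Int :=
  if line < 1 then -1
  else
    match pvFindLineStart content (line - 1).toNat 0 with
    | none => -1
    | some start =>
      let pos := start + column
      if PySem.Str.len content ≤ pos then -1 else pos

-- ===== PRECONDITION & SPEC =====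
def Spec_get_position_from_line_column (content : String) (line : Int) (column : Int) (out : Int) : Prop := out = get_position_from_line_column_alt content line column
instance (content : String) (line : Int) (column : Int) (out : Int) : Decidable (Spec_get_position_from_line_column content line column out) := by unfold Spec_get_position_from_line_column; infer_instance

-- ===== CLAIM (what is proved, stated in full; the proofs are below) =====
def Claim_equal_get_position_from_line_column : Prop := ∀ (content : String) (line : Int) (column : Int), Dom_get_position_from_line_column content line column → Spec_get_position_from_line_column content line column (get_position_from_line_column content line column)

-- ===== LEMMAS AND PROOFS =====

-- structural model of splitting on a single character
def pvSplit (c : Char) : List Char → List (List Char)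
  | [] => [[]]
  | x :: xs =>
    if x = c then [] :: pvSplit c xs
    else (x :: (pvSplit c xs).headI) :: (pvSplit c xs).tail

theorem pvSplit_ne_nil (c : Char) (l : List Char) : pvSplit c l ≠ [] := by
  cases l with
  | nil => simp [pvSplit]
  | cons x xs => simp only [pvSplit]; split <;> simp

theorem pvSplit_eq_cons (c : Char) (l : List Char) :
    pvSplit c l = (pvSplit c l).headI :: (pvSplit c l).tail := by
  cases h : pvSplit c l with
  | nil => exact absurd h (pvSplit_ne_nil c l)
  | cons a t => simp

-- go of Chars.splitOn for a singleton separator computes pvSplit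
theorem pvSplit_cons_self (c : Char) (rest : List Char) :
    pvSplit c (c :: rest) = [] :: pvSplit c rest := by
  simp [pvSplit]

theorem pvSplit_cons_ne (c x : Char) (rest : List Char) (hx : x ≠ c) :
    pvSplit c (x :: rest) = (x :: (pvSplit c rest).headI) :: (pvSplit c rest).tail := by
  simp [pvSplit, hx]

theorem pvGo_eq (c : Char) : ∀ (fuel : Nat) (l cur : List Char) (acc : List (List Char)),
    l.length ≤ fuel →
    PySem.Chars.splitOn.go [c] fuel l cur acc
      = acc.reverse ++ (cur.reverse ++ (pvSplit c l).headI) :: (pvSplit c l).tail := by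
  intro fuel
  induction fuel with
  | zero =>
    intro l cur acc h
    have hl : l = [] := List.length_eq_zero_iff.mp (Nat.le_zero.mp h)
    subst hl
    rw [PySem.Chars.splitOn.go]
    simp [pvSplit]
  | succ n ih =>
    intro l cur acc h
    cases l with
    | nil =>
      rw [PySem.Chars.splitOn.go] <;> simp [pvSplit]
    | cons x rest =>
      obtain ⟨hd, tl, hr⟩ : ∃ hd tl, pvSplit c rest = hd :: tl := by
        cases hh : pvSplit c rest with
        | nil => exact absurd hh (pvSplit_ne_nil c rest)
        | cons a t => exact ⟨a, t, rfl⟩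
      have hlen : rest.length ≤ n := by simpa using Nat.lt_succ_iff.mp (by simpa using h)
      rw [PySem.Chars.splitOn.go]
      simp only [List.isPrefixOf, Bool.and_true, List.length_cons, List.length_nil,
        List.drop_succ_cons, List.drop_zero]
      by_cases hx : x = c
      · rw [if_pos (by simp [hx])]
        rw [ih rest [] (cur.reverse :: acc) hlen]
        rw [hx, pvSplit_cons_self c rest, hr]
        simp
      · rw [if_neg (by simp only [beq_iff_eq]; exact fun e => hx e.symm)]
        rw [ih rest (x :: cur) acc hlen]
        rw [pvSplit_cons_ne c x rest hx, hr]
        simp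

theorem splitOn_eq_pvSplit (c : Char) (l : List Char) :
    PySem.Chars.splitOn l [c] = pvSplit c l := by
  unfold PySem.Chars.splitOn
  rw [pvGo_eq c (l.length + 1) l [] [] (Nat.le_succ _)]
  simp [← pvSplit_eq_cons]

theorem pvFind_go_singleton (c : Char) : ∀ (m : List Char) (k : Nat),
    PySem.Chars.find.go [c] m k
      = if c ∈ m then ((k : Int) + ((m.takeWhile (· ≠ c)).length : Int)) else -1 := by
  intro m
  induction m with
  | nil => intro k; simp [PySem.Chars.find.go.eq_1]
  | cons x rest ih =>
    intro k
    rw [PySem.Chars.find.go.eq_2]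
    simp only [List.isPrefixOf, Bool.and_true]
    by_cases hx : x = c
    · rw [if_pos (by simp [hx])]
      rw [if_pos (by simp [hx] : c ∈ x :: rest)]
      rw [hx, List.takeWhile_cons_of_neg (by simp)]
      simp
    · rw [if_neg (by simp only [beq_iff_eq]; exact fun e => hx e.symm)]
      rw [ih (k + 1)]
      rw [List.takeWhile_cons_of_pos (by simp [hx])]
      by_cases hm : c ∈ rest
      · rw [if_pos hm, if_pos (List.mem_cons_of_mem x hm)]
        simp only [List.length_cons]
        push_cast
        ring
      · rw [if_neg hm, if_neg (by simp [hm, Ne.symm hx])]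

theorem pvFind_singleton (c : Char) (m : List Char) :
    PySem.Chars.find m [c]
      = if c ∈ m then (((m.takeWhile (· ≠ c)).length : Int)) else -1 := by
  unfold PySem.Chars.find
  rw [pvFind_go_singleton]
  simp

theorem pvSplit_of_mem (c : Char) (m : List Char) (h : c ∈ m) :
    pvSplit c m = m.takeWhile (· ≠ c) :: pvSplit c ((m.dropWhile (· ≠ c)).tail) := by
  induction m with
  | nil => cases h
  | cons x rest ih =>
    by_cases hx : x = c
    · rw [hx, pvSplit_cons_self c rest,
        List.takeWhile_cons_of_neg (by simp), List.dropWhile_cons_of_neg (by simp)]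
      simp
    · have hm : c ∈ rest := by
        rcases List.mem_cons.mp h with h1 | h1
        · exact absurd h1.symm hx
        · exact h1
      rw [pvSplit_cons_ne c x rest hx, ih hm,
        List.takeWhile_cons_of_pos (by simp [hx]), List.dropWhile_cons_of_pos (by simp [hx])]
      simp

theorem pvSplit_of_not_mem (c : Char) (m : List Char) (h : c ∉ m) :
    pvSplit c m = [m] := by
  induction m with
  | nil => rfl
  | cons x rest ih =>
    have hx : x ≠ c := fun e => h (by simp [e])
    have hrest : c ∉ rest := fun e => h (by simp [e])
    rw [pvSplit_cons_ne c x rest hx, ih hrest]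
    simp

-- A-side sum lemma: the pyRange/pyGetD sum is the sum over the first k lines
theorem pvSum_take (xs : List (List Char)) : ∀ (k : Nat), k ≤ xs.length →
    ((PySem.List.pyRange 0 (k : Int) 1).map
        (fun i => ((PySem.List.pyGetD xs i []).length : Int) + 1)).sum
      = ((xs.take k).map (fun s => (s.length : Int) + 1)).sum := by
  intro k
  induction k with
  | zero => intro _; simp
  | succ n ih =>
    intro h
    push_cast
    rw [PySem.List.pyRange_one_succ_right (by positivity)]
    have hn : n < xs.length := Nat.lt_of_succ_le h
    rw [List.take_add_one]
    simp only [List.map_append, List.sum_append]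
    rw [ih (Nat.le_of_lt hn)]
    simp [PySem.List.pyGetD_natCast, List.getD_eq_getElem?_getD, List.getElem?_eq_getElem hn]

theorem pvDrop_length_takeWhile {p : Char → Bool} (l : List Char) :
    l.drop (l.takeWhile p).length = l.dropWhile p := by
  induction l with
  | nil => simp
  | cons x xs ih =>
    by_cases hx : p x
    · rw [List.takeWhile_cons_of_pos hx, List.dropWhile_cons_of_pos hx]
      simpa using ih
    · rw [List.takeWhile_cons_of_neg (by simp [hx]), List.dropWhile_cons_of_neg (by simp [hx])]
      simp

-- B-side loop characterization
theorem pvLoop_spec (content : String) : ∀ (k : Nat) (st : Nat),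
    st ≤ content.toList.length →
    pvFindLineStart content k (st : Int)
      = (if k < (pvSplit '\n' (content.toList.drop st)).length
         then some ((st : Int) +
            (((pvSplit '\n' (content.toList.drop st)).take k).map (fun s => (s.length : Int) + 1)).sum)
         else none) := by
  intro k
  induction k with
  | zero =>
    intro st h
    rw [pvFindLineStart]
    rw [if_pos (List.length_pos_of_ne_nil (pvSplit_ne_nil '\n' (content.toList.drop st)))]
    simp
  | succ n ih =>
    intro st h
    rw [pvFindLineStart]
    simp only [PySem.Str.findFrom_eq]
    have hlist : ("\n".toList : List Char) = ['\n'] := rfl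
    rw [hlist, PySem.Chars.findFrom_natCast content.toList ['\n'] st h]
    rw [pvFind_singleton]
    by_cases hc : '\n' ∈ content.toList.drop st
    · rw [if_pos hc]
      have htw := List.takeWhile_append_dropWhile
        (p := fun x => decide (x ≠ '\n')) (l := content.toList.drop st)
      have hdne : (content.toList.drop st).dropWhile (fun x => decide (x ≠ '\n')) ≠ [] := by
        intro he
        have hall := List.dropWhile_eq_nil_iff.mp he
        have := hall '\n' hc
        simp at this
      have hlen1 : ((content.toList.drop st).takeWhile (fun x => decide (x ≠ '\n'))).length + 1
          ≤ (content.toList.drop st).length := by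
        conv_rhs => rw [← htw]
        rw [List.length_append]
        have := List.length_pos_of_ne_nil hdne
        omega
      have hlend : (content.toList.drop st).length = content.toList.length - st :=
        List.length_drop
      rw [if_neg (by omega : ¬ (((((content.toList.drop st).takeWhile (fun x => decide (x ≠ '\n'))).length : Nat) : Int) = -1))]
      rw [if_neg (by omega : ¬ ((st : Int) + (((content.toList.drop st).takeWhile (fun x => decide (x ≠ '\n'))).length : Int) = -1))]
      have hcast : ((st : Int) + (((content.toList.drop st).takeWhile (fun x => decide (x ≠ '\n'))).length : Int) + 1)
          = ((st + ((content.toList.drop st).takeWhile (fun x => decide (x ≠ '\n'))).length + 1 : Nat) : Int) := by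
        push_cast; ring
      rw [hcast]
      rw [ih (st + ((content.toList.drop st).takeWhile (fun x => decide (x ≠ '\n'))).length + 1) (by omega)]
      have hdrop : content.toList.drop
            (st + ((content.toList.drop st).takeWhile (fun x => decide (x ≠ '\n'))).length + 1)
          = ((content.toList.drop st).dropWhile (fun x => decide (x ≠ '\n'))).tail := by
        have h1 : ((content.toList.drop st).drop
              ((content.toList.drop st).takeWhile (fun x => decide (x ≠ '\n'))).length).tail
            = content.toList.drop
              (st + ((content.toList.drop st).takeWhile (fun x => decide (x ≠ '\n'))).length + 1) := by
          rw [List.tail_drop, List.drop_drop, ← Nat.add_assoc]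
        rw [← h1, pvDrop_length_takeWhile]
      rw [hdrop]
      rw [pvSplit_of_mem '\n' (content.toList.drop st) hc]
      simp only [List.length_cons]
      by_cases hn : n < (pvSplit '\n' (((content.toList.drop st).dropWhile (fun x => decide (x ≠ '\n'))).tail)).length
      · rw [if_pos hn, if_pos (by omega)]
        rw [List.take_succ_cons]
        simp only [List.map_cons, List.sum_cons]
        congr 1
        push_cast
        ring
      · rw [if_neg hn, if_neg (by omega)]
    · rw [if_neg hc]
      rw [if_pos rfl, if_pos rfl]
      rw [pvSplit_of_not_mem '\n' (content.toList.drop st) hc]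
      rw [if_neg (by simp only [List.length_cons, List.length_nil]; omega)]

-- ===== VERDICT (by name: the statement is the Claim_ definition above) =====
theorem get_position_from_line_column_spec : Claim_equal_get_position_from_line_column := by
  intro content line column _
  unfold Spec_get_position_from_line_column
  unfold get_position_from_line_column get_position_from_line_column_alt
  by_cases h1 : line < 1
  · rw [if_pos (Or.inl h1), if_pos h1]
  · rw [if_neg h1]
    have hline : 1 ≤ line := by omega
    have hk : ((line - 1).toNat : Int) = line - 1 := Int.toNat_of_nonneg (by omega)
    have hloop := pvLoop_spec content (line - 1).toNat 0 (Nat.zero_le _)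
    rw [List.drop_zero] at hloop
    rw [Nat.cast_zero] at hloop
    rw [hloop]
    rw [splitOn_eq_pvSplit]
    by_cases h2 : (line - 1).toNat < (pvSplit '\n' content.toList).length
    · rw [if_neg (by push_cast at h2 ⊢; omega), if_pos h2]
      have hsum := pvSum_take (pvSplit '\n' content.toList) (line - 1).toNat (Nat.le_of_lt h2)
      rw [hk] at hsum
      rw [hsum]
      rw [zero_add]
    · rw [if_pos (Or.inr (by push_cast at h2 ⊢; omega)), if_neg h2]
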